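-- pv_equiv track=rewrite | github.com/ilya-aby/advent-of-code-2023 | D17/d17p2.py | get_possible_moves
-- ===== SOURCE A (Python) =====
-- def get_possible_moves(data, location, vector):
--     """
--     Helper function to return valid next steps & accumulated heat given a location and vector
--     """
--     min_steps = 4
--     max_steps = 10
--
--     turn_left = { 'E': 'N', 'N': 'W', 'W': 'S', 'S': 'E' }
--     turn_right = { 'E': 'S', 'S': 'W', 'W': 'N', 'N': 'E' }
--     turn_vectors = { 'E': (0,1), 'N': (-1,0), 'W': (0,-1), 'S': (1,0) }
--
--     # Get the vector to the left and right of the current vector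
--     left_turn = turn_vectors[turn_left[vector]]
--     right_turn = turn_vectors[turn_right[vector]]
--     left_vector = turn_left[vector]
--     right_vector = turn_right[vector]
--
--     # Special case: if we're at origin, our 'turn left' actually goes straight
--     if location == (0,0):
--         left_turn = turn_vectors[vector]
--         left_vector = vector
--
--     new_locations = []
--     for i in range(min_steps, max_steps + 1):
--         left_loc = (location[0] + (left_turn[0] * i),
--                 location[1] + (left_turn[1] * i))
--         right_loc = (location[0] + (right_turn[0] * i),
--                 location[1] + (right_turn[1] * i))
--
--         # Check bounds before calculating heat
--         if 0 <= left_loc[0] < len(data) and 0 <= left_loc[1] < len(data[0]):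
--             left_heat = sum(data[loc[0]][loc[1]]
--                             for loc in [(location[0] + (left_turn[0] * j), location[1] + (left_turn[1] * j))
--                                         for j in range(1, i+1)])
--             new_locations.append([left_loc, left_vector, left_heat])
--
--         if 0 <= right_loc[0] < len(data) and 0 <= right_loc[1] < len(data[0]):
--             right_heat = sum(data[loc[0]][loc[1]]
--                              for loc in [(location[0] + (right_turn[0] * j), location[1] + (right_turn[1] * j))
--                                          for j in range(1, i+1)])
--             new_locations.append([right_loc, right_vector, right_heat])
--
--     return new_locations
-- ===== SOURCE B (Python) =====
-- def _extend(data, rows, cols, loc, name, dr, dc, k, total, i, moves):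
--     """Advance one ray to step i: top up the running heat total with the cells
--     between the last summed step k and i (each grid cell is read once), and
--     emit the move if the endpoint is on the grid."""
--     r, c = loc[0] + dr * i, loc[1] + dc * i
--     if 0 <= r < rows and 0 <= c < cols:
--         while k < i:
--             k += 1
--             total += data[loc[0] + dr * k][loc[1] + dc * k]
--         moves.append([(r, c), name, total])
--     return k, total
--
--
-- def get_possible_moves(data, location, vector):
--     """Incremental rewrite: one running prefix-sum of heat per turn direction
--     instead of re-summing the whole ray for every step count."""
--     LEFT = {'E': 'N', 'N': 'W', 'W': 'S', 'S': 'E'}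
--     RIGHT = {'E': 'S', 'S': 'W', 'W': 'N', 'N': 'E'}
--     STEP = {'E': (0, 1), 'N': (-1, 0), 'W': (0, -1), 'S': (1, 0)}
--     rows = len(data)
--     cols = len(data[0]) if data else 0
--     lv = vector if location == (0, 0) else LEFT[vector]
--     rv = RIGHT[vector]
--     (ldr, ldc), (rdr, rdc) = STEP[lv], STEP[rv]
--     moves = []
--     kl = tl = kr = tr = 0
--     for i in range(4, 11):
--         kl, tl = _extend(data, rows, cols, location, lv, ldr, ldc, kl, tl, i, moves)
--         kr, tr = _extend(data, rows, cols, location, rv, rdr, rdc, kr, tr, i, moves)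
--     return moves
-- ===== Notes on version B (the rewrite author's own statement) =====
-- stated objective: alternative
-- what changed: Each turn direction keeps one running prefix-sum of heat and an index of cells already summed, so every ray cell is read and added exactly once, instead of A's nested comprehension that re-sums the whole ray from scratch for every step count i = 4..10.
import Mathlib
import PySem

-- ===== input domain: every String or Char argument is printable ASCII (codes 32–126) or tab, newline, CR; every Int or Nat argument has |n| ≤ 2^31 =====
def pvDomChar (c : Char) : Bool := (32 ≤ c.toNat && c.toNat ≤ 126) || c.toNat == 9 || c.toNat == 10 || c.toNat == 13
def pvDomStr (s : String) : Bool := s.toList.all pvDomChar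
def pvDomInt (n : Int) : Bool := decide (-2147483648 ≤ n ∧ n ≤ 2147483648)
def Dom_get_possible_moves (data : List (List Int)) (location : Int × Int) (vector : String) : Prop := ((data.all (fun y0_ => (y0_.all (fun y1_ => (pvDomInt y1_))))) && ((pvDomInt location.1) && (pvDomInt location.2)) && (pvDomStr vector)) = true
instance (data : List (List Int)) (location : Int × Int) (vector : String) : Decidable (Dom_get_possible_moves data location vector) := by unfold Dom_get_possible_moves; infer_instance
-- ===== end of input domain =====

-- B replaces A's per-step recompute-from-scratch heat sums by one running prefix-sum per turn
-- direction (each ray cell is read once); objective: alternative (constant-factor mechanism).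


-- ===== PORT A =====
-- A's inner heat sum: sum(data[...][...] for loc in [cells j = 1..i along (dr,dc)])
def pvHeat (data : List (List Int)) (r0 c0 dr dc i : Int) : Int :=
  ((PySem.List.pyRange 1 (i + 1) 1).map
    (fun j => PySem.List.pyGetD (PySem.List.pyGetD data (r0 + dr * j) []) (c0 + dc * j) 0)).foldl
    (· + ·) 0

-- A's loop body for one value of i (bounds check, then append [loc, vector, heat])
def pvAStep (data : List (List Int)) (location : Int × Int)
    (left_turn : Int × Int) (left_vector : String)
    (right_turn : Int × Int) (right_vector : String)
    (new_locations : List ((Int × Int) × String × Int)) (i : Int) :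
    List ((Int × Int) × String × Int) :=
  let left_loc := (location.1 + left_turn.1 * i, location.2 + left_turn.2 * i)
  let right_loc := (location.1 + right_turn.1 * i, location.2 + right_turn.2 * i)
  let new_locations :=
    if 0 ≤ left_loc.1 ∧ left_loc.1 < (data.length : Int) ∧
       0 ≤ left_loc.2 ∧ left_loc.2 < ((data.headD []).length : Int) then
      new_locations ++ [(left_loc, left_vector,
        pvHeat data location.1 location.2 left_turn.1 left_turn.2 i)]
    else new_locations
  if 0 ≤ right_loc.1 ∧ right_loc.1 < (data.length : Int) ∧
     0 ≤ right_loc.2 ∧ right_loc.2 < ((data.headD []).length : Int) then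
    new_locations ++ [(right_loc, right_vector,
      pvHeat data location.1 location.2 right_turn.1 right_turn.2 i)]
  else new_locations

def get_possible_moves (data : List (List Int)) (location : Int × Int) (vector : String) :
    List ((Int × Int) × String × Int) :=
  let turn_left : PySem.Dict String String := PySem.Dict.ofList [("E", "N"), ("N", "W"), ("W", "S"), ("S", "E")]
  let turn_right : PySem.Dict String String := PySem.Dict.ofList [("E", "S"), ("S", "W"), ("W", "N"), ("N", "E")]
  let turn_vectors : PySem.Dict String (Int × Int) :=
    PySem.Dict.ofList [("E", (0, 1)), ("N", (-1, 0)), ("W", (0, -1)), ("S", (1, 0))]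
  let left_turn := PySem.Dict.getD turn_vectors (PySem.Dict.getD turn_left vector "") (0, 0)
  let right_turn := PySem.Dict.getD turn_vectors (PySem.Dict.getD turn_right vector "") (0, 0)
  let left_vector := PySem.Dict.getD turn_left vector ""
  let right_vector := PySem.Dict.getD turn_right vector ""
  let left_turn := if location = (0, 0) then PySem.Dict.getD turn_vectors vector (0, 0) else left_turn
  let left_vector := if location = (0, 0) then vector else left_vector
  (PySem.List.pyRange 4 11 1).foldl
    (pvAStep data location left_turn left_vector right_turn right_vector) []

-- ===== PORT B =====
-- B's _extend: top up the running total from step k to step i, emit if endpoint on the grid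
def pvExtend (data : List (List Int)) (rows cols : Int) (loc : Int × Int) (name : String)
    (dr dc : Int) (k total : Int) (i : Int) (moves : List ((Int × Int) × String × Int)) :
    Int × Int × List ((Int × Int) × String × Int) :=
  let r := loc.1 + dr * i
  let c := loc.2 + dc * i
  if 0 ≤ r ∧ r < rows ∧ 0 ≤ c ∧ c < cols then
    let k' := if k < i then i else k
    let total' := (PySem.List.pyRange (k + 1) (i + 1) 1).foldl
      (fun t j => t + PySem.List.pyGetD (PySem.List.pyGetD data (loc.1 + dr * j) [])
        (loc.2 + dc * j) 0) total
    (k', total', moves ++ [((r, c), name, total')])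
  else (k, total, moves)

-- B's loop body: advance both rays at step i (left first, then right)
def pvBStep (data : List (List Int)) (rows cols : Int) (loc : Int × Int)
    (lv : String) (ldr ldc : Int) (rv : String) (rdr rdc : Int)
    (st : Int × Int × Int × Int × List ((Int × Int) × String × Int)) (i : Int) :
    Int × Int × Int × Int × List ((Int × Int) × String × Int) :=
  match st with
  | (kl, tl, kr, tr, moves) =>
    match pvExtend data rows cols loc lv ldr ldc kl tl i moves with
    | (kl', tl', moves') =>
      match pvExtend data rows cols loc rv rdr rdc kr tr i moves' with
      | (kr', tr', moves'') => (kl', tl', kr', tr', moves'')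

def get_possible_moves_alt (data : List (List Int)) (location : Int × Int) (vector : String) :
    List ((Int × Int) × String × Int) :=
  let lft : PySem.Dict String String := PySem.Dict.ofList [("E", "N"), ("N", "W"), ("W", "S"), ("S", "E")]
  let rgt : PySem.Dict String String := PySem.Dict.ofList [("E", "S"), ("S", "W"), ("W", "N"), ("N", "E")]
  let step : PySem.Dict String (Int × Int) :=
    PySem.Dict.ofList [("E", (0, 1)), ("N", (-1, 0)), ("W", (0, -1)), ("S", (1, 0))]
  let rows : Int := data.length
  let cols : Int := (data.headD []).length
  let lv := if location = (0, 0) then vector else PySem.Dict.getD lft vector ""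
  let rv := PySem.Dict.getD rgt vector ""
  let ld := PySem.Dict.getD step lv (0, 0)
  let rd := PySem.Dict.getD step rv (0, 0)
  ((PySem.List.pyRange 4 11 1).foldl
    (pvBStep data rows cols location lv ld.1 ld.2 rv rd.1 rd.2) (0, 0, 0, 0, [])).2.2.2.2

-- ===== PRECONDITION & SPEC =====
-- Pre_'s own copies of A's direction tables (Pre_ must not reach the ports)
def pvPreStepOf (v : String) : Int × Int :=
  if v = "E" then (0, 1) else if v = "N" then (-1, 0)
  else if v = "W" then (0, -1) else if v = "S" then (1, 0) else (0, 0)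
def pvPreLeftOf (v : String) : String :=
  if v = "E" then "N" else if v = "N" then "W"
  else if v = "W" then "S" else if v = "S" then "E" else ""
def pvPreRightOf (v : String) : String :=
  if v = "E" then "S" else if v = "S" then "W"
  else if v = "W" then "N" else if v = "N" then "E" else ""

-- Along one ray: whenever an endpoint i is on the grid, every intermediate cell j = 1..i must be
-- a valid (possibly negative, Python-style) index — exactly the reads A's heat sum performs.
def pvPreDirOK (data : List (List Int)) (r0 c0 dr dc : Int) : Prop :=
  ∀ i ∈ PySem.List.pyRange 4 11 1,
    (0 ≤ r0 + dr * i ∧ r0 + dr * i < (data.length : Int) ∧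
     0 ≤ c0 + dc * i ∧ c0 + dc * i < ((data.headD []).length : Int)) →
    ∀ j ∈ PySem.List.pyRange 1 (i + 1) 1,
      PySem.Raise.InRange data.length (r0 + dr * j) ∧
      PySem.Raise.InRange ((PySem.List.pyGet? data (r0 + dr * j)).getD []).length (c0 + dc * j)

-- Pre_ excludes exactly the inputs where the Python A raises: an unknown vector (KeyError on the
-- turn tables) or a heat-sum read whose wrapped index falls off the grid / off a ragged short row
-- (IndexError); A returns no value outside Pre_.
def Pre_get_possible_moves (data : List (List Int)) (location : Int × Int) (vector : String) : Prop :=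
  (vector = "E" ∨ vector = "N" ∨ vector = "W" ∨ vector = "S") ∧
  pvPreDirOK data location.1 location.2
    (pvPreStepOf (if location = (0, 0) then vector else pvPreLeftOf vector)).1
    (pvPreStepOf (if location = (0, 0) then vector else pvPreLeftOf vector)).2 ∧
  pvPreDirOK data location.1 location.2
    (pvPreStepOf (pvPreRightOf vector)).1 (pvPreStepOf (pvPreRightOf vector)).2

instance (data : List (List Int)) (location : Int × Int) (vector : String) :
    Decidable (Pre_get_possible_moves data location vector) := by
  unfold Pre_get_possible_moves pvPreDirOK; infer_instance

def pvWitness_get_possible_moves : List (List Int) × (Int × Int) × String :=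
  ([[1, 2, 3, 4, 5], [1, 2, 3, 4, 5], [1, 2, 3, 4, 5], [1, 2, 3, 4, 5], [1, 2, 3, 4, 5]],
   (0, 0), "E")

def Spec_get_possible_moves (data : List (List Int)) (location : Int × Int) (vector : String) (out : List ((Int × Int) × String × Int)) : Prop := out = get_possible_moves_alt data location vector
instance (data : List (List Int)) (location : Int × Int) (vector : String) (out : List ((Int × Int) × String × Int)) : Decidable (Spec_get_possible_moves data location vector out) := by unfold Spec_get_possible_moves; infer_instance

-- ===== CLAIM (what is proved, stated in full; the proofs are below) =====
def Claim_equal_get_possible_moves : Prop := ∀ (data : List (List Int)) (location : Int × Int) (vector : String), Dom_get_possible_moves data location vector → Pre_get_possible_moves data location vector → Spec_get_possible_moves data location vector (get_possible_moves data location vector)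

-- ===== LEMMAS AND PROOFS =====

-- catching up the running total from step k to step i yields A's full heat sum at i
lemma pvCatch_heat (data : List (List Int)) (r0 c0 dr dc k i : Int)
    (hk : 0 ≤ k) (hki : k ≤ i) :
    (PySem.List.pyRange (k + 1) (i + 1) 1).foldl
      (fun t j => t + PySem.List.pyGetD (PySem.List.pyGetD data (r0 + dr * j) [])
        (c0 + dc * j) 0) (pvHeat data r0 c0 dr dc k)
    = pvHeat data r0 c0 dr dc i := by
  unfold pvHeat
  rw [PySem.List.pyRange_one_append 1 (k + 1) (i + 1) (by omega) (by omega),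
    List.map_append, List.foldl_append]
  simp only [List.foldl_map]

-- the combined loop: B's stateful fold produces exactly A's emissions, given the invariant
lemma pvLoop_eq (data : List (List Int)) (loc : Int × Int)
    (lv : String) (ldr ldc : Int) (rv : String) (rdr rdc : Int)
    (is : List Int) (kl tl kr tr : Int) (acc : List ((Int × Int) × String × Int))
    (hkl : 0 ≤ kl) (hkr : 0 ≤ kr)
    (hl : ∀ i ∈ is, kl < i) (hr : ∀ i ∈ is, kr < i)
    (hp : List.Pairwise (· < ·) is)
    (htl : tl = pvHeat data loc.1 loc.2 ldr ldc kl)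
    (htr : tr = pvHeat data loc.1 loc.2 rdr rdc kr) :
    (is.foldl (pvBStep data (data.length : Int) ((data.headD []).length : Int) loc
        lv ldr ldc rv rdr rdc) (kl, tl, kr, tr, acc)).2.2.2.2
    = is.foldl (pvAStep data loc (ldr, ldc) lv (rdr, rdc) rv) acc := by
  induction is generalizing kl tl kr tr acc with
  | nil => simp
  | cons i is ih =>
    have hkli : kl < i := hl i (by simp)
    have hkri : kr < i := hr i (by simp)
    have hii : ∀ j ∈ is, i < j := fun j hj => List.rel_of_pairwise_cons hp hj
    have hp' : List.Pairwise (· < ·) is := hp.of_cons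
    subst htl htr
    simp only [List.foldl_cons]
    have hcl := pvCatch_heat data loc.1 loc.2 ldr ldc kl i hkl (le_of_lt hkli)
    have hcr := pvCatch_heat data loc.1 loc.2 rdr rdc kr i hkr (le_of_lt hkri)
    simp only [pvBStep, pvExtend, pvAStep, if_pos hkli, if_pos hkri]
    by_cases hL : 0 ≤ loc.1 + ldr * i ∧ loc.1 + ldr * i < (data.length : Int) ∧
        0 ≤ loc.2 + ldc * i ∧ loc.2 + ldc * i < ((data.headD []).length : Int) <;>
    by_cases hR : 0 ≤ loc.1 + rdr * i ∧ loc.1 + rdr * i < (data.length : Int) ∧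
        0 ≤ loc.2 + rdc * i ∧ loc.2 + rdc * i < ((data.headD []).length : Int) <;>
    simp only [hL, hR, and_self, if_true, if_false] <;>
    (try simp only [hcl, hcr])
    · exact ih i _ i _ _ (by omega) (by omega) hii hii hp' rfl rfl
    · exact ih i _ kr _ _ (by omega) hkr hii (fun j hj => hkri.trans (hii j hj)) hp' rfl rfl
    · exact ih kl _ i _ _ hkl (by omega) (fun j hj => hkli.trans (hii j hj)) hii hp' rfl rfl
    · exact ih kl _ kr _ _ hkl hkr (fun j hj => hkli.trans (hii j hj))
        (fun j hj => hkri.trans (hii j hj)) hp' rfl rfl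

lemma pvHeat_zero (data : List (List Int)) (r0 c0 dr dc : Int) :
    pvHeat data r0 c0 dr dc 0 = 0 := by
  unfold pvHeat
  rw [show (0 : Int) + 1 = 1 from rfl, PySem.List.pyRange_one_eq_nil le_rfl]
  rfl

lemma pv_mem_range_pos : ∀ i ∈ PySem.List.pyRange 4 11 1, (0 : Int) < i := by
  intro i hi
  have := PySem.List.mem_pyRange_one.mp hi
  omega

-- ===== VERDICT (by name: the statement is the Claim_ definition above) =====
theorem get_possible_moves_spec : Claim_equal_get_possible_moves := by
  intro data location vector _ _
  unfold Spec_get_possible_moves get_possible_moves get_possible_moves_alt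
  dsimp only
  by_cases h0 : location = (0, 0) <;> simp only [h0, if_true, if_false]
  · exact (pvLoop_eq data (0, 0) vector
      ((PySem.Dict.ofList [("E", (0, 1)), ("N", (-1, 0)), ("W", (0, -1)), ("S", (1, 0))]).getD vector (0, 0)).1
      ((PySem.Dict.ofList [("E", (0, 1)), ("N", (-1, 0)), ("W", (0, -1)), ("S", (1, 0))]).getD vector (0, 0)).2
      ((PySem.Dict.ofList [("E", "S"), ("S", "W"), ("W", "N"), ("N", "E")]).getD vector "")
      ((PySem.Dict.ofList [("E", (0, 1)), ("N", (-1, 0)), ("W", (0, -1)), ("S", (1, 0))]).getD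
        ((PySem.Dict.ofList [("E", "S"), ("S", "W"), ("W", "N"), ("N", "E")]).getD vector "") (0, 0)).1
      ((PySem.Dict.ofList [("E", (0, 1)), ("N", (-1, 0)), ("W", (0, -1)), ("S", (1, 0))]).getD
        ((PySem.Dict.ofList [("E", "S"), ("S", "W"), ("W", "N"), ("N", "E")]).getD vector "") (0, 0)).2
      (PySem.List.pyRange 4 11 1) 0 0 0 0 []
      le_rfl le_rfl pv_mem_range_pos pv_mem_range_pos (PySem.List.pairwise_lt_pyRange_one 4 11)
      (pvHeat_zero _ _ _ _ _).symm (pvHeat_zero _ _ _ _ _).symm).symm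
  · exact (pvLoop_eq data location
      ((PySem.Dict.ofList [("E", "N"), ("N", "W"), ("W", "S"), ("S", "E")]).getD vector "")
      ((PySem.Dict.ofList [("E", (0, 1)), ("N", (-1, 0)), ("W", (0, -1)), ("S", (1, 0))]).getD
        ((PySem.Dict.ofList [("E", "N"), ("N", "W"), ("W", "S"), ("S", "E")]).getD vector "") (0, 0)).1
      ((PySem.Dict.ofList [("E", (0, 1)), ("N", (-1, 0)), ("W", (0, -1)), ("S", (1, 0))]).getD
        ((PySem.Dict.ofList [("E", "N"), ("N", "W"), ("W", "S"), ("S", "E")]).getD vector "") (0, 0)).2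
      ((PySem.Dict.ofList [("E", "S"), ("S", "W"), ("W", "N"), ("N", "E")]).getD vector "")
      ((PySem.Dict.ofList [("E", (0, 1)), ("N", (-1, 0)), ("W", (0, -1)), ("S", (1, 0))]).getD
        ((PySem.Dict.ofList [("E", "S"), ("S", "W"), ("W", "N"), ("N", "E")]).getD vector "") (0, 0)).1
      ((PySem.Dict.ofList [("E", (0, 1)), ("N", (-1, 0)), ("W", (0, -1)), ("S", (1, 0))]).getD
        ((PySem.Dict.ofList [("E", "S"), ("S", "W"), ("W", "N"), ("N", "E")]).getD vector "") (0, 0)).2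
      (PySem.List.pyRange 4 11 1) 0 0 0 0 []
      le_rfl le_rfl pv_mem_range_pos pv_mem_range_pos (PySem.List.pairwise_lt_pyRange_one 4 11)
      (pvHeat_zero _ _ _ _ _).symm (pvHeat_zero _ _ _ _ _).symm).symm
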